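-- pv_equiv track=rewrite | github.com/gabriel-de-haro/advent_of_code_2024 | day_9/main.py | rearrange_disk_1
-- ===== SOURCE A (Python) =====
-- def rearrange_disk_1(map: list) -> list:
--     """Rearranges the disk map by moving digits to the leftmost available positions for dots."""
--     dot_list = [i for i, val in enumerate(map) if val == "."]
--     num_list = [i for i, val in enumerate(map) if val.isdigit()]
--     while dot_list and num_list:
--         dot_index = dot_list.pop(0)
--         num_index = num_list.pop()
--         if dot_index < num_index:
--             map[dot_index] = map[num_index]
--             map[num_index] = "."
--         else:
--             break
--     return map
-- ===== SOURCE B (Python) =====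
-- def rearrange_disk_1(map: list) -> list:
--     """Two-pointer compaction from both ends; same in-place mutation and return value as the pop-based version."""
--     i, j = 0, len(map) - 1
--     while i < j:
--         if map[i] != ".":
--             i += 1
--         elif not map[j].isdigit():
--             j -= 1
--         else:
--             map[i], map[j] = map[j], map[i]
--             i += 1
--             j -= 1
--     return map
-- ===== Notes on version B (the rewrite author's own statement) =====
-- stated objective: alternative
-- what changed: Replaces the precomputed dot/digit index lists consumed with pop(0)/pop() by a single two-pointer scan from both ends that swaps in place, removing the index lists entirely.
import Mathlib
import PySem

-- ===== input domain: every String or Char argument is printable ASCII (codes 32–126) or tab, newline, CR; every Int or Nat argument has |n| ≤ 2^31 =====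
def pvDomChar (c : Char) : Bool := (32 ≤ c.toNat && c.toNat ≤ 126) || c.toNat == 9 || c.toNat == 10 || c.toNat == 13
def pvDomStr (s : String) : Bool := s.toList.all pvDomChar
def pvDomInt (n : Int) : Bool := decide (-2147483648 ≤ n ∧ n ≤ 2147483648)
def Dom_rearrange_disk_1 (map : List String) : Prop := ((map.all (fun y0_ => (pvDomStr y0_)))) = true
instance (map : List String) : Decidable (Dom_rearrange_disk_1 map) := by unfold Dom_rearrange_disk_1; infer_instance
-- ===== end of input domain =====

-- B replaces A's pop(0)/pop() index-list loop by a single two-pointer in-place scan; both Pythons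
-- mutate `map` in place identically; the theorems below are about the returned value.

-- ===== PORT A =====
-- while dot_list and num_list: pop(0) from dots, pop() from nums, swap or break
def rdLoopA : List String → List Int → List Int → List String
  | m, d :: ds, n0 :: ns =>
      let n := (n0 :: ns).getLast (by simp)
      if d < n then
        rdLoopA (PySem.List.pySetD (PySem.List.pySetD m d (PySem.List.pyGetD m n "")) n ".") ds ((n0 :: ns).dropLast)
      else m
  | m, _, _ => m
termination_by m dots nums => nums.length
decreasing_by simp [List.length_dropLast]

def rearrange_disk_1 (map : List String) : List String :=
  let dot_list := ((PySem.List.enumerate map 0).filter (fun p => p.2 == ".")).map Prod.fst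
  let num_list := ((PySem.List.enumerate map 0).filter (fun p => PySem.Str.strIsdigit p.2)).map Prod.fst
  rdLoopA map dot_list num_list

-- ===== PORT B =====
-- two pointers i (from the left) and j (from the right); swap when i is a dot and j a digit
def rdLoopB (m : List String) (i j : Nat) : List String :=
  if i < j then
    if m.getD i "" ≠ "." then rdLoopB m (i + 1) j
    else if ¬ (PySem.Str.strIsdigit (m.getD j "") = true) then rdLoopB m i (j - 1)
    else
      -- map[i], map[j] = map[j], map[i]
      rdLoopB ((m.set i (m.getD j "")).set j (m.getD i "")) (i + 1) (j - 1)
  else m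
termination_by j - i
decreasing_by all_goals omega

def rearrange_disk_1_alt (map : List String) : List String :=
  rdLoopB map 0 (map.length - 1)

-- ===== PRECONDITION & SPEC =====
def Spec_rearrange_disk_1 (map : List String) (out : List String) : Prop := out = rearrange_disk_1_alt map
instance (map : List String) (out : List String) : Decidable (Spec_rearrange_disk_1 map out) := by unfold Spec_rearrange_disk_1; infer_instance

-- ===== CLAIM (what is proved, stated in full; the proofs are below) =====
def Claim_equal_rearrange_disk_1 : Prop := ∀ (map : List String), Dom_rearrange_disk_1 map → Spec_rearrange_disk_1 map (rearrange_disk_1 map)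

-- ===== LEMMAS AND PROOFS =====

theorem loop_base (m : List String) (i j : Nat) (dots nums : List Int)
    (hij : ¬ i < j)
    (hd : ∀ d ∈ dots, (i : Int) ≤ d) (hn : ∀ n ∈ nums, n ≤ (j : Int)) :
    rdLoopA m dots nums = rdLoopB m i j := by
  rw [rdLoopB, if_neg hij]
  rcases dots with _ | ⟨d, ds⟩
  · rw [rdLoopA]; simp
  rcases nums with _ | ⟨n0, ns⟩
  · rw [rdLoopA]; simp
  rw [rdLoopA]
  apply if_neg
  have h1 : (i:Int) ≤ d := hd d (by simp)
  have h2 : (n0::ns).getLast (by simp) ≤ (j:Int) := hn _ (List.getLast_mem _)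
  omega

theorem loop_eq (k : Nat) : ∀ (m : List String) (i j : Nat) (dots nums : List Int),
    j - i ≤ k →
    dots.Pairwise (· < ·) → nums.Pairwise (· < ·) →
    (∀ d ∈ dots, (i : Int) ≤ d) → (∀ n ∈ nums, n ≤ (j : Int)) →
    (∀ p : Nat, i ≤ p → p ≤ j →
      ((m.getD p "" = ".") ↔ ((p : Int) ∈ dots)) ∧
      ((PySem.Str.strIsdigit (m.getD p "") = true) ↔ ((p : Int) ∈ nums))) →
    rdLoopA m dots nums = rdLoopB m i j := by
  induction k with
  | zero =>
    intro m i j dots nums hk _ _ hd hn _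
    exact loop_base m i j dots nums (by omega) hd hn
  | succ k ih =>
    intro m i j dots nums hk hpd hpn hd hn hcls
    by_cases hij : i < j
    · rw [rdLoopB]
      rw [if_pos hij]
      split_ifs with h1 h2
      · -- m.getD i "" ≠ "."
        have hi : (i:Int) ∉ dots := fun h => h1 (((hcls i le_rfl (le_of_lt hij)).1).mpr h)
        apply ih m (i+1) j dots nums (by omega) hpd hpn
        · intro d hdm
          have := hd d hdm
          have : (i:Int) ≠ d := fun e => hi (e ▸ hdm)
          push_cast; omega
        · exact hn
        · intro p hp0 hp1; exact hcls p (by omega) hp1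
      · -- swap branch (split_ifs order: ¬c1, ¬c2)
        rw [not_not] at h1
        have hi : (i:Int) ∈ dots := ((hcls i le_rfl (le_of_lt hij)).1).mp h1
        have hj : (j:Int) ∈ nums := ((hcls j (le_of_lt hij) le_rfl).2).mp h2
        rcases dots with _ | ⟨d, ds⟩
        · simp at hi
        rcases nums with _ | ⟨n0, ns⟩
        · simp at hj
        have hne : (n0 :: ns) ≠ ([] : List Int) := by simp
        -- head of dots is i
        have hdi : d = (i:Int) := by
          rcases List.mem_cons.mp hi with h | h
          · exact h.symm
          · have := (List.pairwise_cons.mp hpd).1 _ h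
            have := hd d (by simp)
            omega
        -- getLast of nums is j
        have hlt : ∀ x ∈ (n0::ns).dropLast, x < (n0::ns).getLast hne := by
          have hperm := List.dropLast_append_getLast hne
          have := hpn
          rw [← hperm] at this
          intro x hx
          exact (List.pairwise_append.mp this).2.2 x hx _ (by simp)
        have hgj : (n0::ns).getLast hne = (j:Int) := by
          have h1' : (n0::ns).getLast hne ≤ (j:Int) := hn _ (List.getLast_mem hne)
          rcases (by rw [List.dropLast_append_getLast hne]; exact hj :
              (j:Int) ∈ (n0::ns).dropLast ++ [(n0::ns).getLast hne]) |> List.mem_append.mp with h | h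
          · have := hlt _ h; omega
          · simp at h; omega
        rw [rdLoopA]
        rw [if_pos (by rw [hgj, hdi]; exact_mod_cast hij)]
        rw [hgj, hdi]
        simp only [PySem.List.pySetD_natCast, PySem.List.pyGetD_natCast]
        rw [h1]
        apply ih _ (i+1) (j-1) ds ((n0::ns).dropLast) (by omega)
          ((List.pairwise_cons.mp hpd).2)
          (List.Pairwise.sublist (List.dropLast_sublist _) hpn)
        · intro x hx
          have := (List.pairwise_cons.mp hpd).1 x hx
          push_cast; omega
        · intro x hx
          have := hlt x hx
          rw [hgj] at this
          push_cast [Nat.cast_sub (by omega : 1 ≤ j)]; omega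
        · intro p hp0 hp1
          have hgd : ((m.set i (m.getD j "")).set j ".").getD p "" = m.getD p "" := by
            simp [List.getD_eq_getElem?_getD,
              List.getElem?_set_ne (by omega : j ≠ p),
              List.getElem?_set_ne (by omega : i ≠ p)]
          rw [hgd]
          have hc := hcls p (by omega) (by omega)
          constructor
          · rw [hc.1, hdi]
            constructor
            · intro h; rcases List.mem_cons.mp h with h | h
              · exfalso; have : (i:Int) = (p:Int) := h.symm; omega
              · exact h
            · exact fun h => List.mem_cons_of_mem _ h
          · rw [hc.2]
            conv_lhs => rw [← List.dropLast_append_getLast hne, hgj]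
            simp only [List.mem_append, List.mem_singleton]
            constructor
            · intro h; rcases h with h | h
              · exact h
              · exfalso; have : (p:Int) = (j:Int) := h; omega
            · exact fun h => Or.inl h
      · -- m.getD i "" = "." , m.getD j not digit
        rw [not_not] at h1
        have hj : (j:Int) ∉ nums := fun h => h2 (((hcls j (le_of_lt hij) le_rfl).2).mpr h)
        apply ih m i (j-1) dots nums (by omega) hpd hpn hd
        · intro n hnm
          have := hn n hnm
          have : (j:Int) ≠ n := fun e => hj (e ▸ hnm)
          push_cast [Nat.cast_sub (by omega : 1 ≤ j)]; omega
        · intro p hp0 hp1; exact hcls p hp0 (by omega)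
    · exact loop_base m i j dots nums hij hd hn

theorem init_pairwise (map : List String) (f : String → Bool) :
    (((PySem.List.enumerate map 0).filter (fun q => f q.2)).map Prod.fst).Pairwise (· < ·) :=
  List.Pairwise.map Prod.fst (fun _ _ h => h)
    ((PySem.List.pairwise_lt_enumerate map 0).filter _)

theorem mem_bound (map : List String) (f : String → Bool) (x : Int)
    (hx : x ∈ ((PySem.List.enumerate map 0).filter (fun q => f q.2)).map Prod.fst) :
    ∃ k : Nat, k < map.length ∧ x = (k : Int) := by
  simp only [List.mem_map, List.mem_filter, PySem.List.mem_enumerate_iff] at hx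
  obtain ⟨q, ⟨⟨k, hk, rfl⟩, -⟩, rfl⟩ := hx
  exact ⟨k, hk, by simp⟩

theorem mem_idx (map : List String) (f : String → Bool) (p : Nat) (hp : p < map.length) :
    ((p : Int) ∈ ((PySem.List.enumerate map 0).filter (fun q => f q.2)).map Prod.fst) ↔
      f (map[p]) = true := by
  simp only [List.mem_map, List.mem_filter, PySem.List.mem_enumerate_iff]
  constructor
  · rintro ⟨q, ⟨⟨k, hk, rfl⟩, hf⟩, hfst⟩
    simp only [zero_add] at hfst
    have : k = p := by exact_mod_cast hfst
    subst this; exact hf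
  · intro hf
    exact ⟨((p : Int), map[p]), ⟨⟨p, hp, by simp⟩, hf⟩, rfl⟩

theorem rearrange_disk_1' (map : List String) :
    rdLoopA map (((PySem.List.enumerate map 0).filter (fun q => q.2 == ".")).map Prod.fst)
      (((PySem.List.enumerate map 0).filter (fun q => PySem.Str.strIsdigit q.2)).map Prod.fst)
    = rdLoopB map 0 (map.length - 1) := by
  refine loop_eq map.length map 0 (map.length - 1) _ _ (by omega)
    (init_pairwise map (fun s => s == ".")) (init_pairwise map PySem.Str.strIsdigit) ?_ ?_ ?_
  · intro d hdm
    obtain ⟨k, hk, rfl⟩ := mem_bound map (fun s => s == ".") d hdm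
    simp
  · intro n hnm
    obtain ⟨k, hk, rfl⟩ := mem_bound map PySem.Str.strIsdigit n hnm
    have : k ≤ map.length - 1 := by omega
    exact_mod_cast this
  · intro p hp0 hp1
    rcases Nat.lt_or_ge p map.length with h | h
    · have hg : map.getD p "" = map[p] := by
        rw [List.getD_eq_getElem?_getD, List.getElem?_eq_getElem h]; rfl
      rw [hg, mem_idx map (fun s => s == ".") p h, mem_idx map PySem.Str.strIsdigit p h]
      constructor
      · exact ⟨fun e => by simp [e], fun e => by simpa using e⟩
      · exact Iff.rfl
    · have hlen : map.length = 0 := by omega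
      rw [List.length_eq_zero_iff] at hlen
      subst hlen
      simp [PySem.List.enumerate]
      decide

-- ===== VERDICT (by name: the statement is the Claim_ definition above) =====
theorem rearrange_disk_1_spec : Claim_equal_rearrange_disk_1 := by
  intro map _
  unfold Spec_rearrange_disk_1 rearrange_disk_1 rearrange_disk_1_alt
  exact rearrange_disk_1' map
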